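-- pv_equiv track=rewrite | github.com/TDTU-K25/discrete-structures | Lab/version1/Lab03/Lab03.py | ex3_b
-- ===== SOURCE A (Python) =====
-- def ex3_b(truths):
--     truth_table_p_or_q = []
--     truth_table_p = []
--
--     for item in truths:
--         if item[0] == 1:
--             a = True
--         else:
--             a = False
--
--         if item[1] == 1:
--             b = True
--         else:
--             b = False
--
--         truth_table_p_or_q.append(a or b)
--         truth_table_p.append(a)
--
--     isEquivalent = True
--     for i in range(len(truth_table_p_or_q)):
--         if (truth_table_p_or_q[i] != truth_table_p[i]):
--             isEquivalent = False
--             break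
--
--     return isEquivalent
-- ===== SOURCE B (Python) =====
-- def ex3_b(truths):
--     return all(item[0] == 1 or item[1] != 1 for item in truths)
-- ===== Notes on version B (the rewrite author's own statement) =====
-- stated objective: simpler
-- what changed: Replaces the two intermediate truth-table lists and the second comparison loop with a single all() pass evaluating the per-row predicate item[0]==1 or item[1]!=1 directly.
import Mathlib
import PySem

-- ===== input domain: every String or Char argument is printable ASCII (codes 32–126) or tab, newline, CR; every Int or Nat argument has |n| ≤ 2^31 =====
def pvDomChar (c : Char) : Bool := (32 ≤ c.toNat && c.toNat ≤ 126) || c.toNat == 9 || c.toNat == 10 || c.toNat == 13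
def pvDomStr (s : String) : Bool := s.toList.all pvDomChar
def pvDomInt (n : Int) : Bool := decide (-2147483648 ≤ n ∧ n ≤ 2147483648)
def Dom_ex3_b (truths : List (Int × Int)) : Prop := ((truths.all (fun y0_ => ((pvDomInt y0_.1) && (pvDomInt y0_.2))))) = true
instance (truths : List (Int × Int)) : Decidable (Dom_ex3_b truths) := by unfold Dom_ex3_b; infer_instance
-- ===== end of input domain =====

-- B replaces A's two intermediate truth-table lists and second comparison loop with one all() pass; objective: simpler.

-- ===== PORT A =====
-- first loop: build truth_table_p_or_q and truth_table_p
def ex3_bTables (truths : List (Int × Int)) : List Bool × List Bool :=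
  truths.foldl (fun acc item =>
    let a := if item.1 == 1 then true else false
    let b := if item.2 == 1 then true else false
    (acc.1 ++ [a || b], acc.2 ++ [a])) ([], [])

-- second loop: for i in range(len), compare position by position, break on mismatch
def ex3_bCompare : List Bool → List Bool → Bool
  | x :: xs, y :: ys => if x != y then false else ex3_bCompare xs ys
  | _, _ => true

def ex3_b (truths : List (Int × Int)) : Bool :=
  let t := ex3_bTables truths
  ex3_bCompare t.1 t.2

-- ===== PORT B =====
def ex3_b_alt (truths : List (Int × Int)) : Bool :=
  truths.all (fun item => item.1 == 1 || item.2 != 1)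

-- ===== PRECONDITION & SPEC =====
def Spec_ex3_b (truths : List (Int × Int)) (out : Bool) : Prop := out = ex3_b_alt truths
instance (truths : List (Int × Int)) (out : Bool) : Decidable (Spec_ex3_b truths out) := by unfold Spec_ex3_b; infer_instance

-- ===== CLAIM (what is proved, stated in full; the proofs are below) =====
def Claim_equal_ex3_b : Prop := ∀ (truths : List (Int × Int)), Dom_ex3_b truths → Spec_ex3_b truths (ex3_b truths)

-- ===== LEMMAS AND PROOFS =====
theorem ex3_bTables_acc (truths : List (Int × Int)) (l1 l2 : List Bool) :
    truths.foldl (fun acc item =>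
      let a := if item.1 == 1 then true else false
      let b := if item.2 == 1 then true else false
      (acc.1 ++ [a || b], acc.2 ++ [a])) (l1, l2)
    = (l1 ++ truths.map (fun item => (if item.1 == 1 then true else false) || (if item.2 == 1 then true else false)),
       l2 ++ truths.map (fun item => if item.1 == 1 then true else false)) := by
  induction truths generalizing l1 l2 with
  | nil => simp
  | cons h t ih =>
    simp only [List.foldl_cons]
    rw [ih]
    simp

theorem ex3_bCompare_map (truths : List (Int × Int)) :
    ex3_bCompare
      (truths.map (fun item => (if item.1 == 1 then true else false) || (if item.2 == 1 then true else false)))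
      (truths.map (fun item => if item.1 == 1 then true else false))
    = truths.all (fun item => item.1 == 1 || item.2 != 1) := by
  induction truths with
  | nil => rfl
  | cons h t ih =>
    simp only [List.map, List.all_cons, ex3_bCompare, ← ih]
    by_cases h1 : h.1 = 1 <;> by_cases h2 : h.2 = 1 <;> simp [h1, h2]

-- ===== VERDICT (by name: the statement is the Claim_ definition above) =====
theorem ex3_b_spec : Claim_equal_ex3_b := by
  intro truths _
  unfold Spec_ex3_b ex3_b ex3_b_alt ex3_bTables
  rw [ex3_bTables_acc truths [] []]
  simpa using ex3_bCompare_map truths
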